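-- pv_equiv track=rewrite | github.com/Arvo-AI/aurora | server/chat/backend/agent/tools/dynatrace_tool.py | _truncate_results
-- ===== SOURCE A (Python) =====
-- MAX_OUTPUT_SIZE = 2 * 1024 * 1024
--
-- def _truncate_results(results: list, serialized: list[str]) -> tuple[list, bool]:
--     truncated, total_size = [], 0
--     for item, item_str in zip(results, serialized):
--         if total_size + len(item_str) > MAX_OUTPUT_SIZE:
--             return truncated, True
--         truncated.append(item)
--         total_size += len(item_str)
--     return truncated, False
-- ===== SOURCE B (Python) =====
-- from itertools import accumulate
--
-- MAX_OUTPUT_SIZE = 2 * 1024 * 1024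
--
-- def _truncate_results(results: list, serialized: list[str]) -> tuple[list, bool]:
--     n = min(len(results), len(serialized))
--     totals = list(accumulate(len(s) for s in serialized[:n]))
--     cut = next((i for i, t in enumerate(totals) if t > MAX_OUTPUT_SIZE), None)
--     if cut is None:
--         return results[:n], False
--     return results[:cut], True
-- ===== Notes on version B (the rewrite author's own statement) =====
-- stated objective: alternative
-- what changed: Replaces the per-item accumulate-and-branch loop with a table-then-search-then-slice decomposition: build the running-total table of serialized lengths with itertools.accumulate, find the first index whose total exceeds MAX_OUTPUT_SIZE, and slice results there.
import Mathlib
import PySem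

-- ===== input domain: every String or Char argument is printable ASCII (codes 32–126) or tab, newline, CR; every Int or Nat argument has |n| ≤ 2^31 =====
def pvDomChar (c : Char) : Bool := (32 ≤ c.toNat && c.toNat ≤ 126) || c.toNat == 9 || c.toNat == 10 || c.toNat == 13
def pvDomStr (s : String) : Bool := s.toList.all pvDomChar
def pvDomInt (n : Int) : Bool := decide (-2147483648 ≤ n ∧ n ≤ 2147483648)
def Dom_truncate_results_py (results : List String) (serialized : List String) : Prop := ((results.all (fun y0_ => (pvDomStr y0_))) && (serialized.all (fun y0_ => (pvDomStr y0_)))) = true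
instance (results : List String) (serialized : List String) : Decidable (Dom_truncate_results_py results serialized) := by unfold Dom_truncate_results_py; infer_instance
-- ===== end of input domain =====

-- B replaces A's accumulate-and-branch loop by a table-then-search-then-slice decomposition (same cost, different shape).

-- ===== PORT A =====
def pvMaxOutputSize : Int := 2 * 1024 * 1024

-- the for-loop of A: state = (truncated, total_size)
def pvTruncLoop : List (String × String) → List String → Int → List String × Bool
  | [], truncated, _ => (truncated, false)
  | (item, item_str) :: rest, truncated, total_size =>
    if total_size + PySem.Str.len item_str > pvMaxOutputSize then (truncated, true)
    else pvTruncLoop rest (truncated ++ [item]) (total_size + PySem.Str.len item_str)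

def truncate_results_py (results : List String) (serialized : List String) : List String × Bool :=
  pvTruncLoop (results.zip serialized) [] 0

-- ===== PORT B =====
def truncate_results_py_alt (results : List String) (serialized : List String) : List String × Bool :=
  let n := min results.length serialized.length
  let totals := (((serialized.take n).map (fun s => PySem.Str.len s)).scanl (· + ·) 0).tail
  match totals.findIdx? (fun t => decide (t > pvMaxOutputSize)) with
  | none => (results.take n, false)
  | some cut => (results.take cut, true)

-- ===== PRECONDITION & SPEC =====
def Spec_truncate_results_py (results : List String) (serialized : List String) (out : List String × Bool) : Prop := out = truncate_results_py_alt results serialized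
instance (results : List String) (serialized : List String) (out : List String × Bool) : Decidable (Spec_truncate_results_py results serialized out) := by unfold Spec_truncate_results_py; infer_instance

-- ===== CLAIM (what is proved, stated in full; the proofs are below) =====
def Claim_equal_truncate_results_py : Prop := ∀ (results : List String) (serialized : List String), Dom_truncate_results_py results serialized → Spec_truncate_results_py results serialized (truncate_results_py results serialized)

-- ===== LEMMAS AND PROOFS =====

lemma pvZip_fst : ∀ (r s : List String), (r.zip s).map Prod.fst = r.take (min r.length s.length)
  | [], _ => by simp
  | _ :: _, [] => by simp
  | a :: r, b :: s => by
    simp [List.zip_cons_cons, pvZip_fst r s, Nat.succ_min_succ]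

lemma pvZip_snd_len : ∀ (r s : List String),
    (r.zip s).map (fun p => (p.2.length : Int)) = (s.map (fun t => (t.length : Int))).take (min r.length s.length)
  | [], _ => by simp
  | _ :: _, [] => by simp
  | a :: r, b :: s => by
    simp [List.zip_cons_cons, pvZip_snd_len r s, Nat.succ_min_succ]

lemma pvScanl_head_tail (f : Int → Int → Int) (a : Int) (l : List Int) :
    List.scanl f a l = a :: (List.scanl f a l).tail := by
  cases l <;> simp

lemma pvTruncLoop_eq (ps : List (String × String)) :
    ∀ (acc : List String) (total : Int),
    pvTruncLoop ps acc total =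
      match ((ps.map (fun p => (p.2.length : Int))).scanl (· + ·) total).tail.findIdx?
          (fun t => decide (t > pvMaxOutputSize)) with
      | none => (acc ++ ps.map Prod.fst, false)
      | some i => (acc ++ (ps.map Prod.fst).take i, true) := by
  induction ps with
  | nil => intro acc total; simp [pvTruncLoop]
  | cons p rest ih =>
    intro acc total
    obtain ⟨item, item_str⟩ := p
    simp only [List.map_cons, List.scanl_cons, List.tail_cons]
    rw [pvScanl_head_tail, List.findIdx?_cons]
    by_cases h : pvMaxOutputSize < total + (item_str.length : Int)
    · simp [pvTruncLoop, h]
    · simp only [pvTruncLoop, gt_iff_lt, PySem.Str.len_eq, String.length_toList, h, if_false,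
        decide_eq_true_eq]
      rw [ih (acc ++ [item]) (total + (item_str.length : Int))]
      cases hf : ((rest.map (fun p => (p.2.length : Int))).scanl (· + ·)
          (total + (item_str.length : Int))).tail.findIdx? (fun t => decide (t > pvMaxOutputSize)) with
      | none => simp
      | some i => simp

lemma pvFindIdx?_lt_length {p : Int → Bool} {l : List Int} {i : ℕ}
    (h : l.findIdx? p = some i) : i < l.length := by
  have := List.findIdx?_eq_some_iff_findIdx_eq.mp h
  omega

-- ===== VERDICT (by name: the statement is the Claim_ definition above) =====
theorem truncate_results_py_spec : Claim_equal_truncate_results_py := by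
  intro results serialized _
  unfold Spec_truncate_results_py truncate_results_py truncate_results_py_alt
  rw [pvTruncLoop_eq, pvZip_fst, pvZip_snd_len]
  simp only [PySem.Str.len_eq, gt_iff_lt, List.map_take, List.nil_append]
  cases hf : (((serialized.map (fun t => (t.length : Int))).take
        (min results.length serialized.length)).scanl
      (· + ·) 0).tail.findIdx? (fun t => decide (pvMaxOutputSize < t)) with
  | none => simp [hf]
  | some i =>
    have hi := pvFindIdx?_lt_length hf
    simp only [List.length_tail, List.length_scanl, List.length_take, List.length_map] at hi
    have hmin : min i (min results.length serialized.length) = i := by omega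
    simp [hf, List.take_take, hmin]
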